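-- pv_equiv track=rewrite | github.com/AkarshRaj-7920/Python_Projects | Mini_Projects/lernings/Code Polisher/Week_1/Day_6/02_vowel-consonant_equal_filter.py | equal_vowel_consonant_filter
-- ===== SOURCE A (Python) =====
-- def equal_vowel_consonant_filter(text: str) -> list[str]:
--     '''
--     Filters and returns words with equal number of vowels and consonants.
--
--     Args:
--         text(str): Input sentence
--
--     Returns:
--         list[str]: Words where vowels == consonants
--     '''
--     vowels = ("a", "e", "i", "o", "u")
--     words = text.strip().split()
--     result = []
--
--     for word in words:
--         vowel_count = 0
--         consonant_count = 0
--         for char in word: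
--             if char.lower() in vowels:
--                 vowel_count += 1
--             elif char.isalpha():
--                 consonant_count += 1
--
--         if vowel_count == consonant_count:
--             result.append(word)
--
--     return result
-- ===== SOURCE B (Python) =====
-- def equal_vowel_consonant_filter(text: str) -> list[str]:
--     '''Streaming scan of the raw text (no strip/split, no per-word pass):
--     builds each word on the fly while tracking a single vowel-minus-consonant
--     balance (+1 vowel, -1 other letter); a word is emitted at its boundary
--     iff the balance is back to 0.'''
--     result = []
--     word = ""
--     bal = 0
--     for ch in text:
--         if ch.isspace():
--             if word:
--                 if bal == 0:
--                     result.append(word)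
--                 word = ""
--                 bal = 0
--         else:
--             word += ch
--             if ch.lower() in "aeiou":
--                 bal += 1
--             elif ch.isalpha():
--                 bal -= 1
--     if word and bal == 0:
--         result.append(word)
--     return result
-- ===== Notes on version B (the rewrite author's own statement) =====
-- stated objective: alternative
-- what changed: Replaces strip/split plus a nested per-word counting loop (two counters, equality test) by a single streaming scan of the raw text that builds words at whitespace boundaries while tracking one vowel-minus-consonant balance (+1/-1), emitting a word iff its balance is 0.
import Mathlib
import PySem

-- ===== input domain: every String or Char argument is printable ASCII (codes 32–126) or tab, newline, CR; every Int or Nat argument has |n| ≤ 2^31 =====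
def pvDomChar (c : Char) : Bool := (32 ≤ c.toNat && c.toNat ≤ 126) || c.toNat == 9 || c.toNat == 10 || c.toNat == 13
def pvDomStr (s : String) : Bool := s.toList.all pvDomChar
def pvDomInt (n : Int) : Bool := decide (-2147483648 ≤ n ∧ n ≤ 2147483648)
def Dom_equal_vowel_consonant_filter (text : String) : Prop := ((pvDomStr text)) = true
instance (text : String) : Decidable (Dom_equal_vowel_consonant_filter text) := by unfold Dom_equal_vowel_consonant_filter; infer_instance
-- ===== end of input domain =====

-- B: one streaming pass over the raw text with a ±1 vowel/consonant balance and on-the-fly word building, instead of A's strip/split plus a nested two-counter loop per word (alternative decomposition, same cost).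


-- ===== PORT A =====
-- literal port of A: loop over words of text.strip().split(), inner loop keeping (vowel_count, consonant_count), append when equal
def equal_vowel_consonant_filter (text : String) : List String :=
  let vowels : List Char := ['a', 'e', 'i', 'o', 'u']
  let words := PySem.Str.split₀ (PySem.Str.strip text)
  words.foldl (fun result word =>
    let counts := word.toList.foldl
      (fun (p : Int × Int) char =>
        if PySem.Chars.lowerChar char ∈ vowels then (p.1 + 1, p.2)
        else if PySem.Chars.isalpha char then (p.1, p.2 + 1)
        else p) (0, 0)
    if counts.1 = counts.2 then result ++ [word] else result) []

-- ===== PORT B =====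
-- per-character streaming step: state = (result, current word, vowel-minus-consonant balance)
def pvStep (st : List String × List Char × Int) (ch : Char) : List String × List Char × Int :=
  let result := st.1
  let word := st.2.1
  let bal := st.2.2
  if PySem.Chars.isspace ch then
    if word.isEmpty then (result, word, bal)
    else ((if bal = 0 then result ++ [String.ofList word] else result), [], 0)
  else
    (result, word ++ [ch],
      if PySem.Chars.lowerChar ch ∈ ['a', 'e', 'i', 'o', 'u'] then bal + 1
      else if PySem.Chars.isalpha ch then bal - 1
      else bal)

def equal_vowel_consonant_filter_alt (text : String) : List String :=
  let st := text.toList.foldl pvStep ([], [], 0)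
  if ¬ st.2.1.isEmpty ∧ st.2.2 = 0 then st.1 ++ [String.ofList st.2.1] else st.1

-- ===== PRECONDITION & SPEC =====
def Spec_equal_vowel_consonant_filter (text : String) (out : List String) : Prop := out = equal_vowel_consonant_filter_alt text
instance (text : String) (out : List String) : Decidable (Spec_equal_vowel_consonant_filter text out) := by unfold Spec_equal_vowel_consonant_filter; infer_instance

-- ===== CLAIM (what is proved, stated in full; the proofs are below) =====
def Claim_equal_equal_vowel_consonant_filter : Prop := ∀ (text : String), Dom_equal_vowel_consonant_filter text → Spec_equal_vowel_consonant_filter text (equal_vowel_consonant_filter text)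

-- ===== LEMMAS AND PROOFS =====

-- vowel-minus-consonant balance of a word
def pvBal (w : List Char) : Int :=
  (w.countP (fun c => decide (PySem.Chars.lowerChar c ∈ ['a', 'e', 'i', 'o', 'u'])) : Int)
    - (w.countP (fun c => !decide (PySem.Chars.lowerChar c ∈ ['a', 'e', 'i', 'o', 'u'])
          && PySem.Chars.isalpha c) : Int)

-- the final flush of B, as a function of the fold's end state
def pvFlush (st : List String × List Char × Int) : List String :=
  if ¬ st.2.1.isEmpty ∧ st.2.2 = 0 then st.1 ++ [String.ofList st.2.1] else st.1

-- reference splitter: words of (pending ++ cs), pending being the partially read current word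
def pvWords : List Char → List Char → List (List Char)
  | pending, [] => if pending.isEmpty then [] else [pending]
  | pending, c :: rest =>
      if PySem.Chars.isspace c then
        if pending.isEmpty then pvWords [] rest else pending :: pvWords [] rest
      else pvWords (pending ++ [c]) rest

lemma pvBal_nil : pvBal [] = 0 := by simp [pvBal]

lemma pvBal_append (w : List Char) (c : Char) :
    pvBal (w ++ [c])
      = (if PySem.Chars.lowerChar c ∈ ['a', 'e', 'i', 'o', 'u'] then pvBal w + 1
         else if PySem.Chars.isalpha c then pvBal w - 1
         else pvBal w) := by
  by_cases hv : PySem.Chars.lowerChar c ∈ ['a', 'e', 'i', 'o', 'u']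
  · have h1 : (decide (PySem.Chars.lowerChar c ∈ ['a', 'e', 'i', 'o', 'u'])) = true :=
      decide_eq_true hv
    rw [if_pos hv]
    simp only [pvBal, List.countP_append, List.countP_singleton, h1, Bool.not_true,
      Bool.false_and, if_true, Bool.false_eq_true, if_false]
    push_cast; ring
  · have h1 : (decide (PySem.Chars.lowerChar c ∈ ['a', 'e', 'i', 'o', 'u'])) = false :=
      decide_eq_false hv
    rw [if_neg hv]
    by_cases ha : PySem.Chars.isalpha c = true
    · rw [if_pos ha]
      simp only [pvBal, List.countP_append, List.countP_singleton, h1, Bool.not_false,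
        Bool.true_and, ha, Bool.false_eq_true, if_false, if_true]
      push_cast; ring
    · rw [if_neg ha]
      simp only [pvBal, List.countP_append, List.countP_singleton, h1, Bool.not_false,
        Bool.true_and, Bool.eq_false_iff.mpr ha, Bool.false_eq_true, if_false]
      push_cast; ring

-- split₀.go in terms of pvWords
lemma pv_go_eq (cs : List Char) : ∀ cur acc,
    PySem.Chars.split₀.go cs cur acc = acc.reverse ++ pvWords cur.reverse cs := by
  induction cs with
  | nil =>
      intro cur acc
      by_cases h : cur.isEmpty
      · simp [PySem.Chars.split₀.go, pvWords, h]
      · simp [PySem.Chars.split₀.go, pvWords, h]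
  | cons c rest ih =>
      intro cur acc
      by_cases hs : PySem.Chars.isspace c = true
      · by_cases h : cur.isEmpty
        · have hc : cur = [] := by simpa [List.isEmpty_iff] using h
          simp [PySem.Chars.split₀.go, pvWords, hs, hc, ih]
        · simp [PySem.Chars.split₀.go, pvWords, hs, h, ih]
      · simp [PySem.Chars.split₀.go, pvWords, hs, ih]

-- all-whitespace suffix contributes no word
lemma pv_words_allspace (ws : List Char) (h : ∀ c ∈ ws, PySem.Chars.isspace c = true) :
    pvWords [] ws = [] := by
  induction ws with
  | nil => simp [pvWords]
  | cons c rest ih =>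
      simp [pvWords, h c (by simp)]
      exact ih (fun x hx => h x (by simp [hx]))

lemma pv_words_append_space (ws : List Char) (h : ∀ c ∈ ws, PySem.Chars.isspace c = true) :
    ∀ xs pending, pvWords pending (xs ++ ws) = pvWords pending xs := by
  intro xs
  induction xs with
  | nil =>
      intro pending
      cases ws with
      | nil => simp
      | cons c rest =>
          have hc : PySem.Chars.isspace c = true := h c (by simp)
          have hrest : pvWords [] rest = [] :=
            pv_words_allspace rest (fun x hx => h x (by simp [hx]))
          by_cases hp : pending.isEmpty
          · simp [pvWords, hc, hp, hrest]
          · simp [pvWords, hc, hp, hrest]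
  | cons x xt ih =>
      intro pending
      by_cases hs : PySem.Chars.isspace x = true
      · by_cases hp : pending.isEmpty
        · simp [pvWords, hs, hp, ih]
        · simp [pvWords, hs, hp, ih]
      · simp [pvWords, hs, ih]

-- leading whitespace is irrelevant
lemma pv_words_lstrip (s : List Char) :
    pvWords [] (List.dropWhile PySem.Chars.isspace s) = pvWords [] s := by
  induction s with
  | nil => simp
  | cons c rest ih =>
      by_cases hs : PySem.Chars.isspace c = true
      · simp [hs, pvWords, ih]
      · simp [hs]

-- stripping changes nothing for the splitter
lemma pv_words_strip (s : List Char) :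
    pvWords [] (PySem.Chars.strip s) = pvWords [] s := by
  have hdec : ∀ t : List Char,
      t = PySem.Chars.rstrip t ++ (t.reverse.takeWhile PySem.Chars.isspace).reverse := by
    intro t
    conv_lhs => rw [← List.reverse_reverse t,
      ← List.takeWhile_append_dropWhile (p := PySem.Chars.isspace) (l := t.reverse)]
    rw [List.reverse_append]
    simp [PySem.Chars.rstrip]
  calc pvWords [] (PySem.Chars.strip s)
      = pvWords [] (PySem.Chars.rstrip (PySem.Chars.lstrip s)) := rfl
    _ = pvWords [] (PySem.Chars.lstrip s) := by
        conv_rhs => rw [hdec (PySem.Chars.lstrip s)]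
        rw [pv_words_append_space _ (fun c hc =>
          List.mem_takeWhile_imp (by simpa using hc))]
    _ = pvWords [] s := by simpa [PySem.Chars.lstrip] using pv_words_lstrip s

-- the streaming fold with final flush computes the filtered words
lemma pv_fold_flush (cs : List Char) : ∀ result word,
    pvFlush (cs.foldl pvStep (result, word, pvBal word))
      = result ++ ((pvWords word cs).filter (fun w => pvBal w = 0)).map String.ofList := by
  induction cs with
  | nil =>
      intro result word
      by_cases h : word.isEmpty
      · simp [pvFlush, pvWords, h]
      · by_cases hb : pvBal word = 0
        · simp [pvFlush, pvWords, h, hb]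
        · simp [pvFlush, pvWords, h, hb]
  | cons c rest ih =>
      intro result word
      rw [List.foldl_cons]
      by_cases hs : PySem.Chars.isspace c = true
      · by_cases h : word.isEmpty
        · have hw : word = [] := by simpa [List.isEmpty_iff] using h
          subst hw
          have hstep : pvStep (result, ([] : List Char), pvBal []) c
              = (result, ([] : List Char), pvBal []) := by
            simp [pvStep, hs]
          rw [hstep, ih result []]
          simp [pvWords, hs]
        · by_cases hb : pvBal word = 0
          · have hstep : pvStep (result, word, pvBal word) c
                = (result ++ [String.ofList word], ([] : List Char), pvBal []) := by
              simp [pvStep, hs, h, hb, pvBal_nil]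
            rw [hstep, ih (result ++ [String.ofList word]) []]
            simp [pvWords, hs, h, hb]
          · have hstep : pvStep (result, word, pvBal word) c
                = (result, ([] : List Char), pvBal []) := by
              simp [pvStep, hs, h, hb, pvBal_nil]
            rw [hstep, ih result []]
            simp [pvWords, hs, h, hb]
      · have hstep : pvStep (result, word, pvBal word) c
            = (result, word ++ [c], pvBal (word ++ [c])) := by
          simp [pvStep, hs, pvBal_append]
        rw [hstep, ih result (word ++ [c])]
        simp [pvWords, hs]

-- A's inner fold computes the two tallies
lemma pv_fold_counts (cs : List Char) : ∀ (a b : Int),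
    cs.foldl (fun (p : Int × Int) char =>
        if PySem.Chars.lowerChar char ∈ ['a', 'e', 'i', 'o', 'u'] then (p.1 + 1, p.2)
        else if PySem.Chars.isalpha char then (p.1, p.2 + 1)
        else p) (a, b)
      = (a + cs.countP (fun c => decide (PySem.Chars.lowerChar c ∈ ['a', 'e', 'i', 'o', 'u'])),
         b + cs.countP (fun c => !decide (PySem.Chars.lowerChar c ∈ ['a', 'e', 'i', 'o', 'u'])
                 && PySem.Chars.isalpha c)) := by
  induction cs with
  | nil => simp
  | cons c t ih =>
      intro a b
      rw [List.foldl_cons, List.countP_cons, List.countP_cons]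
      by_cases hv : PySem.Chars.lowerChar c ∈ ['a', 'e', 'i', 'o', 'u']
      · rw [if_pos hv, ih]
        simp only [decide_eq_true hv, Bool.not_true, Bool.false_and, Prod.mk.injEq]
        constructor <;> push_cast <;> omega
      · by_cases ha : PySem.Chars.isalpha c = true
        · rw [if_neg hv, if_pos ha, ih]
          simp only [decide_eq_false hv, Bool.not_false, ha, Bool.and_true, Prod.mk.injEq]
          constructor <;> push_cast <;> omega
        · rw [if_neg hv, if_neg ha, ih]
          simp only [decide_eq_false hv, Bool.not_false,
            Bool.eq_false_iff.mpr ha, Bool.and_false, Prod.mk.injEq]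
          constructor <;> push_cast <;> omega

-- A's per-word test is 'balance = 0'
lemma pv_test_eq (w : List Char) :
    ((w.foldl (fun (p : Int × Int) char =>
        if PySem.Chars.lowerChar char ∈ ['a', 'e', 'i', 'o', 'u'] then (p.1 + 1, p.2)
        else if PySem.Chars.isalpha char then (p.1, p.2 + 1)
        else p) ((0 : Int), (0 : Int))).1
      = (w.foldl (fun (p : Int × Int) char =>
        if PySem.Chars.lowerChar char ∈ ['a', 'e', 'i', 'o', 'u'] then (p.1 + 1, p.2)
        else if PySem.Chars.isalpha char then (p.1, p.2 + 1)
        else p) ((0 : Int), (0 : Int))).2)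
    ↔ pvBal w = 0 := by
  rw [pv_fold_counts]
  simp only [pvBal, zero_add]
  omega

-- ===== VERDICT (by name: the statement is the Claim_ definition above) =====
theorem equal_vowel_consonant_filter_spec : Claim_equal_equal_vowel_consonant_filter := by
  intro text _
  unfold Spec_equal_vowel_consonant_filter equal_vowel_consonant_filter equal_vowel_consonant_filter_alt
  have hB : (let st := text.toList.foldl pvStep ([], [], 0);
      if ¬ st.2.1.isEmpty ∧ st.2.2 = 0 then st.1 ++ [String.ofList st.2.1] else st.1)
      = ((pvWords [] text.toList).filter (fun w => pvBal w = 0)).map String.ofList := by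
    have h0 := pv_fold_flush text.toList [] []
    rw [pvBal_nil] at h0
    simpa [pvFlush] using h0
  rw [hB]
  have hA : PySem.Str.split₀ (PySem.Str.strip text)
      = (pvWords [] text.toList).map String.ofList := by
    simp only [PySem.Str.split₀, PySem.Str.toList_strip, PySem.Chars.split₀]
    rw [pv_go_eq]
    simp only [List.reverse_nil, List.nil_append]
    rw [pv_words_strip]
  rw [hA]
  have hfun : (fun (result : List String) (word : String) =>
      let counts := word.toList.foldl
        (fun (p : Int × Int) char =>
          if PySem.Chars.lowerChar char ∈ ['a', 'e', 'i', 'o', 'u'] then (p.1 + 1, p.2)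
          else if PySem.Chars.isalpha char then (p.1, p.2 + 1)
          else p) (0, 0)
      if counts.1 = counts.2 then result ++ [word] else result)
      = (fun result word =>
          if (fun (w : String) => decide (pvBal w.toList = 0)) word = true
          then result ++ [id word] else result) := by
    funext result word
    by_cases hc : pvBal word.toList = 0
    · rw [if_pos ((pv_test_eq word.toList).mpr hc)]
      simp [hc]
    · rw [if_neg (fun hx => hc ((pv_test_eq word.toList).mp hx))]
      simp [hc]
  dsimp only
  rw [hfun, PySem.List.foldl_append_if, List.nil_append, List.filter_map, List.map_id]
  congr 1
  apply List.filter_congr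
  intro w _
  simp [Function.comp]
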